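-- pv_equiv track=rewrite | github.com/virtualdvid/interviews | meta/slow_sums.py | getTotalTime
-- ===== SOURCE A (Python) =====
-- def getTotalTime(arr: list) -> int:
--   """Gets the max penalty
--
--   Args:
--       arr (list): list of integers to evaluate
--
--   Returns:
--       int: max penalty found
--   """
--   output = 0
--   if len(arr) == 1:
--       return arr[0]
--   while len(arr) > 1:
--     # use pop property to extract the max number of the array twice
--     penalty = arr.pop(arr.index(max(arr))) + arr.pop(arr.index(max(arr)))
--     arr.append(penalty)
--     output += penalty
--   return output
-- ===== SOURCE B (Python) =====
-- def getTotalTime(arr: list) -> int: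
--   """Gets the max penalty (sort once, keep the pool descending; no mutation of arr)."""
--   if len(arr) == 1:
--     return arr[0]
--   pool = sorted(arr, reverse=True)
--   total = 0
--   while len(pool) > 1:
--     s = pool[0] + pool[1]
--     total += s
--     rest = pool[2:]
--     i = 0
--     while i < len(rest) and rest[i] > s:
--       i += 1
--     rest.insert(i, s)
--     pool = rest
--   return total
-- ===== Notes on version B (the rewrite author's own statement) =====
-- stated objective: faster
-- what changed: Instead of rescanning the whole list with max/index/pop on every iteration, B sorts once in descending order and keeps the pool sorted by inserting each new penalty at its ordered position, so the two maxima are always the first two elements; B also does not mutate the caller's list.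
import Mathlib
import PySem

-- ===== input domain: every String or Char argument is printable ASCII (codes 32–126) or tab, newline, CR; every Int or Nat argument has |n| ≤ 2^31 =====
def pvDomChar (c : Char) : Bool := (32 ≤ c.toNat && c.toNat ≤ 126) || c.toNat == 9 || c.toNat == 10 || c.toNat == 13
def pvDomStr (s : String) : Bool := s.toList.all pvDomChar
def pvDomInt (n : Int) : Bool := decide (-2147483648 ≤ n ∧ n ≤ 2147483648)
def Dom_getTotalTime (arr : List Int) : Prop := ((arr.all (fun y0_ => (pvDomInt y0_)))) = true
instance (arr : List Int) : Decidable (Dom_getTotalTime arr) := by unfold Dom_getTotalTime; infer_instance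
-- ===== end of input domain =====

-- B sorts once (descending) and keeps the pool ordered by inserting each new penalty at its
-- ordered position, instead of A's max/index/pop full scans on every iteration.
-- A mutates its argument in place (pop/append); B does not: the equivalence is about the return value.

-- ===== PORT A =====
-- arr.pop(arr.index(max(arr))): none only on the empty list (the loop guard excludes it)
def pyPopMax (arr : List Int) : Option (Int × List Int) :=
  match PySem.List.max? arr (fun x => x) with
  | none => none
  | some m =>
    match PySem.List.index? arr m with
    | none => none
    | some i => PySem.List.pop? arr (i : Int)

-- the while loop; fuel = initial length (each iteration shrinks arr by one, stops at length 1)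
def getTotalTimeGo : Nat → List Int → Int → Int
  | 0, _, out => out
  | f+1, arr, out =>
    if 1 < arr.length then
      match pyPopMax arr with
      | some (x, arr1) =>
        match pyPopMax arr1 with
        | some (y, arr2) =>
          -- penalty = x + y; arr.append(penalty); output += penalty
          getTotalTimeGo f (arr2 ++ [x + y]) (out + (x + y))
        | none => out
      | none => out
    else out

def getTotalTime (arr : List Int) : Int :=
  if arr.length == 1 then (PySem.List.pyGet? arr 0).getD 0   -- arr[0], in range since len = 1
  else getTotalTimeGo arr.length arr 0

-- ===== PORT B =====
-- 'i = 0; while i < len(rest) and rest[i] > s: i += 1; rest.insert(i, s)': scan past the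
-- elements greater than s, insert s there (keeps the pool descending)
def insDesc : Int → List Int → List Int
  | s, [] => [s]
  | s, x :: xs => if x > s then x :: insDesc s xs else s :: x :: xs

-- the while loop of Source B; fuel = initial length
def altGo : Nat → List Int → Int → Int
  | 0, _, total => total
  | f+1, pool, total =>
    match pool with
    | x :: y :: rest => altGo f (insDesc (x + y) rest) (total + (x + y))
    | _ => total

def getTotalTime_alt (arr : List Int) : Int :=
  if arr.length == 1 then (PySem.List.pyGet? arr 0).getD 0
  else altGo arr.length (PySem.List.sorted arr (fun x => x) true) 0

-- ===== PRECONDITION & SPEC =====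
def Spec_getTotalTime (arr : List Int) (out : Int) : Prop := out = getTotalTime_alt arr
instance (arr : List Int) (out : Int) : Decidable (Spec_getTotalTime arr out) := by unfold Spec_getTotalTime; infer_instance

-- ===== CLAIM (what is proved, stated in full; the proofs are below) =====
def Claim_equal_getTotalTime : Prop := ∀ (arr : List Int), Dom_getTotalTime arr → Spec_getTotalTime arr (getTotalTime arr)

-- ===== LEMMAS AND PROOFS =====

lemma pyPopMax_spec (l₁ t : List Int) (x : Int) (hp : l₁.Perm (x :: t))
    (hx : ∀ z ∈ t, z ≤ x) :
    ∃ l₁', pyPopMax l₁ = some (x, l₁') ∧ l₁'.Perm t := by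
  have hne : l₁ ≠ [] := by
    intro h; subst h; exact (List.cons_ne_nil x t) hp.nil_eq.symm
  -- max? returns some m
  obtain ⟨m, hm⟩ : ∃ m, PySem.List.max? l₁ (fun x => x) = some m := by
    rcases h : PySem.List.max? l₁ (fun x => x) with _ | m
    · exact absurd ((PySem.List.max?_eq_none_iff l₁ (fun x => x)).mp h) hne
    · exact ⟨m, rfl⟩
  have hmmem : m ∈ l₁ := PySem.List.max?_mem hm
  have hmax : ∀ y ∈ l₁, y ≤ m := PySem.List.max?_isMax hm
  have hmx : m = x := by
    have h1 : m ≤ x := by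
      have := hp.mem_iff.mp hmmem
      rcases List.mem_cons.mp this with rfl | hmem
      · exact le_rfl
      · exact hx m hmem
    have h2 : x ≤ m := hmax x (hp.mem_iff.mpr (List.mem_cons_self))
    omega
  subst hmx
  -- index? returns some i
  obtain ⟨i, hi⟩ : ∃ i, PySem.List.index? l₁ m = some i := by
    rcases h : PySem.List.index? l₁ m with _ | i
    · exact absurd ((PySem.List.index?_eq_none_iff l₁ m).mp h) (by simpa using hmmem)
    · exact ⟨i, rfl⟩
  obtain ⟨pre, suf, hsplit, hlen, hnotin⟩ := (PySem.List.index?_eq_some_iff l₁ m i).mp hi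
  have hilt : i < l₁.length := by
    subst hsplit; simp [← hlen]
  have hpop : PySem.List.pop? l₁ (i : Int) = some (l₁[i], l₁.eraseIdx i) :=
    PySem.List.pop?_natCast l₁ i hilt
  have hget : l₁[i] = m := by
    obtain ⟨hk, hv, _⟩ := PySem.List.getElem_of_index?_eq_some hi
    exact hv
  have herase : l₁.eraseIdx i = pre ++ suf := by
    subst hsplit; rw [← hlen]; exact List.eraseIdx_append_of_length_le (le_refl _) _ |>.trans (by simp)
  refine ⟨l₁.eraseIdx i, ?_, ?_⟩
  · have hi' := hi
    rw [PySem.List.index?_eq_idxOf?] at hi'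
    simp [pyPopMax, hm, hi', hpop, hget]
  · -- l₁ ~ x :: t and l₁ = pre ++ m :: suf, so pre ++ suf ~ t
    have h1 : l₁.Perm (m :: (pre ++ suf)) := by
      subst hsplit; exact List.perm_middle
    have h2 : (m :: (pre ++ suf)).Perm (m :: t) := h1.symm.trans hp
    rw [herase]
    exact h2.cons_inv

lemma insDesc_perm (s : Int) (l : List Int) : (insDesc s l).Perm (s :: l) := by
  induction l with
  | nil => simp [insDesc]
  | cons x xs ih =>
    simp only [insDesc]
    split
    · exact ((ih.cons x).trans (List.Perm.swap s x xs))
    · exact List.Perm.refl _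

lemma insDesc_pairwise (s : Int) (l : List Int) (h : l.Pairwise (· ≥ ·)) :
    (insDesc s l).Pairwise (· ≥ ·) := by
  induction l with
  | nil => simp [insDesc]
  | cons x xs ih =>
    simp only [insDesc]
    rcases List.pairwise_cons.mp h with ⟨hx, hxs⟩
    split
    · rename_i hgt
      refine List.pairwise_cons.mpr ⟨?_, ih hxs⟩
      intro z hz
      have := List.mem_cons.mp ((insDesc_perm s xs).mem_iff.mp hz)
      rcases this with rfl | hmem
      · omega
      · exact hx z hmem
    · rename_i hle
      refine List.pairwise_cons.mpr ⟨?_, h⟩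
      intro z hz
      rcases List.mem_cons.mp hz with rfl | hmem
      · omega
      · have := hx z hmem; omega

lemma altGo_short (f : Nat) (l : List Int) (out : Int) (h : l.length ≤ 1) :
    altGo f l out = out := by
  cases f with
  | zero => rfl
  | succ f =>
    match l with
    | [] => rfl
    | [a] => rfl

lemma go_eq_altGo : ∀ (f₁ : Nat) (f₂ : Nat) (l₁ l₂ : List Int) (out : Int),
    l₁.Perm l₂ → l₂.Pairwise (· ≥ ·) → l₁.length ≤ f₁ → l₁.length ≤ f₂ →
    getTotalTimeGo f₁ l₁ out = altGo f₂ l₂ out := by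
  intro f₁
  induction f₁ with
  | zero =>
    intro f₂ l₁ l₂ out hp hs h1 h2
    have : l₁ = [] := List.length_eq_zero_iff.mp (Nat.le_zero.mp h1)
    subst this
    have : l₂ = [] := hp.nil_eq.symm
    subst this
    exact (altGo_short f₂ [] out (by simp)).symm
  | succ f ih =>
    intro f₂ l₁ l₂ out hp hs h1 h2
    by_cases hlen : 1 < l₁.length
    · -- l₂ has ≥ 2 elements
      have hlen2 : 1 < l₂.length := hp.length_eq ▸ hlen
      match l₂, hs with
      | x :: y :: rest, hs =>
        rcases List.pairwise_cons.mp hs with ⟨hx, hs'⟩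
        rcases List.pairwise_cons.mp hs' with ⟨hy, hs''⟩
        -- first pop
        obtain ⟨l₁', hpop1, hperm1⟩ := pyPopMax_spec l₁ (y :: rest) x hp
          (by intro z hz; rcases List.mem_cons.mp hz with rfl | hm
              · exact hx z (List.mem_cons_self)
              · exact hx z (List.mem_cons_of_mem _ hm))
        obtain ⟨l₂', hpop2, hperm2⟩ := pyPopMax_spec l₁' rest y hperm1 hy
        have hl1len : l₁.length = rest.length + 2 := by
          have := hp.length_eq; simpa using this
        have hl2len : l₂'.length = rest.length := hperm2.length_eq
        have hrec : (l₂' ++ [x + y]).length ≤ f := by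
          simp [hl2len]; omega
        match f₂, (by omega : 1 ≤ f₂) with
        | f₂' + 1, _ =>
          have hrec2 : (l₂' ++ [x + y]).length ≤ f₂' := by simp [hl2len]; omega
          simp only [getTotalTimeGo, altGo, if_pos hlen, hpop1, hpop2]
          exact ih f₂' (l₂' ++ [x + y]) (insDesc (x + y) rest) (out + (x + y))
            ((List.perm_append_singleton _ _).trans ((hperm2.cons (x+y)).trans (insDesc_perm (x+y) rest).symm))
            (insDesc_pairwise (x+y) rest hs'') hrec hrec2
    · -- l₁ length ≤ 1: both loops return out
      have h2' : l₂.length ≤ 1 := by have := hp.length_eq; omega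
      rw [altGo_short f₂ l₂ out h2']
      cases l₁ with
      | nil => rfl
      | cons a t =>
        have : t = [] := by
          cases t with
          | nil => rfl
          | cons b u => exfalso; exact hlen (by simp)
        subst this
        simp [getTotalTimeGo]

-- ===== VERDICT (by name: the statement is the Claim_ definition above) =====
theorem getTotalTime_spec : Claim_equal_getTotalTime := by
  intro arr _
  unfold Spec_getTotalTime getTotalTime getTotalTime_alt
  by_cases h1 : arr.length == 1
  · simp [h1]
  · simp only [h1]
    exact go_eq_altGo arr.length arr.length arr (PySem.List.sorted arr (fun x => x) true) 0
      (PySem.List.sorted_perm arr (fun x => x) true).symm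
      (by simpa using PySem.List.sorted_pairwise_rev arr (fun x => x))
      le_rfl (by simp)
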